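-- pv_equiv track=rewrite | github.com/EugeneAlimov/tradinng_bot | src/utils/env.py | _split_kv
-- ===== SOURCE A (Python) =====
-- def _strip_inline_comment(s: str) -> str:
--     """Убираем #комментарий, если он вне кавычек."""
--     out = []
--     in_sq = in_dq = False
--     for ch in s:
--         if ch == "'" and not in_dq:
--             in_sq = not in_sq
--         elif ch == '"' and not in_sq:
--             in_dq = not in_dq
--         elif ch == "#" and not in_sq and not in_dq:
--             break
--         out.append(ch)
--     return "".join(out).rstrip()
--
-- def _unquote(v: str) -> str:
--     v = v.strip()
--     if (len(v) >= 2) and ((v[0] == v[-1]) and v[0] in ("'", '"')):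
--         return v[1:-1]
--     return v
--
-- def _split_kv(line: str) -> tuple[str, str] | tuple[None, None]:
--     """
--     Разбираем:
--       KEY=VAL
--       export KEY=VAL
--       KEY: VAL
--       (поддержка кавычек и инлайн-комментов)
--     """
--     s = line.strip()
--     if not s or s.startswith("#"):
--         return None, None
--     if s.startswith("export "):
--         s = s[7:].lstrip()
--
--     # ищем первый = или : вне кавычек
--     in_sq = in_dq = False
--     pos = -1
--     for i, ch in enumerate(s):
--         if ch == "'" and not in_dq:
--             in_sq = not in_sq
--         elif ch == '"' and not in_sq:
--             in_dq = not in_dq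
--         elif ch in ("=", ":") and not in_sq and not in_dq:
--             pos = i;
--             break
--     if pos <= 0:
--         return None, None
--
--     k = s[:pos].strip()
--     v = s[pos + 1:].strip()
--     if not k:
--         return None, None
--
--     v = _strip_inline_comment(v)
--     v = _unquote(v)
--     return k, v
-- ===== SOURCE B (Python) =====
-- def _split_kv(line: str):
--     s = line.strip()
--     if not s or s.startswith("#"):
--         return None, None
--     if s.startswith("export "):
--         s = s[7:].lstrip()
--
--     key = []
--     val = []
--     in_sq = in_dq = False
--     after_sep = False
--     for ch in s:
--         if ch == "'" and not in_dq:
--             in_sq = not in_sq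
--         elif ch == '"' and not in_sq:
--             in_dq = not in_dq
--         elif not in_sq and not in_dq and not after_sep and ch in ("=", ":"):
--             after_sep = True
--             continue
--         elif not in_sq and not in_dq and after_sep and ch == "#":
--             break
--         (val if after_sep else key).append(ch)
--
--     if not after_sep:
--         return None, None
--     k = "".join(key).strip()
--     if not k:
--         return None, None
--     v = "".join(val).strip()
--     if len(v) >= 2 and v[0] == v[-1] and v[0] in ("'", '"'):
--         v = v[1:-1]
--     return k, v
-- ===== Notes on version B (the rewrite author's own statement) =====
-- stated objective: alternative
-- what changed: A's three separate scans over the line (find the first separator outside quotes, then re-scan the value for an inline comment, then unquote) are replaced by one left-to-right state-machine pass that accumulates key and value directly, switching phase at the separator and stopping at an unquoted comment mark.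
import Mathlib
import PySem

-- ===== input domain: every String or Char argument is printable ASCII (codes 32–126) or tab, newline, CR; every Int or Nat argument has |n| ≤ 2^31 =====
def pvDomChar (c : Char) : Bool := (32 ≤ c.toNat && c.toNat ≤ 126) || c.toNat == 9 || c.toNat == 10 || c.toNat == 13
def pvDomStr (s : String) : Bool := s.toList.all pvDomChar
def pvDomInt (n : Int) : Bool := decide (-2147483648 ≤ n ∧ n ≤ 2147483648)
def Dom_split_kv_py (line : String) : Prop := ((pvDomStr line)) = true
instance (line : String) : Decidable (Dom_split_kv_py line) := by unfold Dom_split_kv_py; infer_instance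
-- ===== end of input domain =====

-- B replaces A's three separate scans (find-separator, strip-inline-comment, unquote) by one
-- left-to-right state-machine pass that accumulates key and value directly (objective: alternative).

-- ===== PORT A =====

-- A's `for i, ch in enumerate(s)` search for the first '='/':' outside quotes; returns -1 like A's pos.
def aSepScan : List Char → Bool → Bool → Nat → Int
  | [], _, _, _ => -1
  | c :: rest, in_sq, in_dq, i =>
    if c = '\'' ∧ in_dq = false then aSepScan rest (!in_sq) in_dq (i + 1)
    else if c = '"' ∧ in_sq = false then aSepScan rest in_sq (!in_dq) (i + 1)
    else if (c = '=' ∨ c = ':') ∧ in_sq = false ∧ in_dq = false then (i : Int)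
    else aSepScan rest in_sq in_dq (i + 1)

-- A's _strip_inline_comment loop body (the rstrip is applied at the call site).
def aComment : List Char → Bool → Bool → List Char
  | [], _, _ => []
  | c :: rest, in_sq, in_dq =>
    if c = '\'' ∧ in_dq = false then c :: aComment rest (!in_sq) in_dq
    else if c = '"' ∧ in_sq = false then c :: aComment rest in_sq (!in_dq)
    else if c = '#' ∧ in_sq = false ∧ in_dq = false then []
    else c :: aComment rest in_sq in_dq

-- A's _unquote
def aUnquote (v : List Char) : List Char :=
  let v := PySem.Chars.strip v
  if 2 ≤ v.length ∧ PySem.List.pyGet? v 0 = PySem.List.pyGet? v (-1) ∧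
      (PySem.List.pyGet? v 0 = some '\'' ∨ PySem.List.pyGet? v 0 = some '"') then
    PySem.List.slice v (some 1) (some (-1))
  else v

def split_kv_py (line : String) : Option String × Option String :=
  let s := (PySem.Str.strip line).toList
  if s = [] ∨ PySem.Chars.startswith s ['#'] then (none, none)
  else
    let s := if PySem.Chars.startswith s "export ".toList then
               PySem.Chars.lstrip (PySem.List.slice s (some 7) none)
             else s
    let pos := aSepScan s false false 0
    if pos ≤ 0 then (none, none)
    else
      let k := PySem.Chars.strip (PySem.List.slice s none (some pos))
      let v := PySem.Chars.strip (PySem.List.slice s (some (pos + 1)) none)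
      if k = [] then (none, none)
      else
        let v := PySem.Chars.rstrip (aComment v false false)
        let v := aUnquote v
        (some (String.ofList k), some (String.ofList v))

-- ===== PORT B =====

-- B's single pass: returns (key chars, value chars, after_sep flag).
def bLoop : List Char → Bool → Bool → Bool → List Char → List Char → List Char × List Char × Bool
  | [], _, _, after, key, val => (key, val, after)
  | c :: rest, in_sq, in_dq, after, key, val =>
    if c = '\'' ∧ in_dq = false then
      if after then bLoop rest (!in_sq) in_dq after key (val ++ [c])
      else bLoop rest (!in_sq) in_dq after (key ++ [c]) val
    else if c = '"' ∧ in_sq = false then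
      if after then bLoop rest in_sq (!in_dq) after key (val ++ [c])
      else bLoop rest in_sq (!in_dq) after (key ++ [c]) val
    else if in_sq = false ∧ in_dq = false ∧ after = false ∧ (c = '=' ∨ c = ':') then
      bLoop rest in_sq in_dq true key val
    else if in_sq = false ∧ in_dq = false ∧ after = true ∧ c = '#' then
      (key, val, after)
    else
      if after then bLoop rest in_sq in_dq after key (val ++ [c])
      else bLoop rest in_sq in_dq after (key ++ [c]) val

def split_kv_py_alt (line : String) : Option String × Option String :=
  let s := (PySem.Str.strip line).toList
  if s = [] ∨ PySem.Chars.startswith s ['#'] then (none, none)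
  else
    let s := if PySem.Chars.startswith s "export ".toList then
               PySem.Chars.lstrip (PySem.List.slice s (some 7) none)
             else s
    let r := bLoop s false false false [] []
    if r.2.2 = false then (none, none)
    else
      let k := PySem.Chars.strip r.1
      if k = [] then (none, none)
      else
        let v := PySem.Chars.strip r.2.1
        let v := if 2 ≤ v.length ∧ PySem.List.pyGet? v 0 = PySem.List.pyGet? v (-1) ∧
                     (PySem.List.pyGet? v 0 = some '\'' ∨ PySem.List.pyGet? v 0 = some '"') then
                   PySem.List.slice v (some 1) (some (-1))
                 else v
        (some (String.ofList k), some (String.ofList v))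

-- ===== PRECONDITION & SPEC =====
def Spec_split_kv_py (line : String) (out : Option String × Option String) : Prop := out = split_kv_py_alt line
instance (line : String) (out : Option String × Option String) : Decidable (Spec_split_kv_py line out) := by unfold Spec_split_kv_py; infer_instance

-- ===== CLAIM (what is proved, stated in full; the proofs are below) =====
def Claim_equal_split_kv_py : Prop := ∀ (line : String), Dom_split_kv_py line → Spec_split_kv_py line (split_kv_py line)

-- ===== LEMMAS AND PROOFS =====

-- proof-side spec of the separator search: relative position of the first '='/':' outside quotes
def sep? : List Char → Bool → Bool → Option Nat
  | [], _, _ => none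
  | c :: rest, in_sq, in_dq =>
    if c = '\'' ∧ in_dq = false then (sep? rest (!in_sq) in_dq).map (· + 1)
    else if c = '"' ∧ in_sq = false then (sep? rest in_sq (!in_dq)).map (· + 1)
    else if (c = '=' ∨ c = ':') ∧ in_sq = false ∧ in_dq = false then some 0
    else (sep? rest in_sq in_dq).map (· + 1)


theorem rstrip_eq (s : List Char) :
    PySem.Chars.rstrip s = List.rdropWhile PySem.Chars.isspace s := rfl

theorem strip_eq (s : List Char) :
    PySem.Chars.strip s =
      List.rdropWhile PySem.Chars.isspace (List.dropWhile PySem.Chars.isspace s) := rfl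

theorem ws_ne (c : Char) (h : PySem.Chars.isspace c = true) :
    c ≠ '\'' ∧ c ≠ '"' ∧ c ≠ '#' := by
  refine ⟨?_, ?_, ?_⟩ <;> rintro rfl <;> simp [PySem.Chars.isspace] at h

theorem rd_cons (p : Char → Bool) (a : Char) (l : List Char) :
    List.rdropWhile p (a :: l) =
      if List.rdropWhile p l = [] then (if p a then [] else [a])
      else a :: List.rdropWhile p l := by
  simp only [List.rdropWhile, List.reverse_cons, List.dropWhile_append, List.reverse_eq_nil_iff,
    List.isEmpty_iff]
  split_ifs with h hp <;> simp_all

theorem dw_rd_comm (p : Char → Bool) (l : List Char) :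
    List.dropWhile p (List.rdropWhile p l) = List.rdropWhile p (List.dropWhile p l) := by
  induction l with
  | nil => simp
  | cons a l ih =>
    rw [rd_cons]
    by_cases hp : p a
    · rw [List.dropWhile_cons_of_pos hp]
      split_ifs with h
      · have : List.dropWhile p l = [] :=
          List.dropWhile_eq_nil_iff.mpr (List.rdropWhile_eq_nil_iff.mp h)
        simp [this]
      · rw [List.dropWhile_cons_of_pos hp, ih]
    · rw [List.dropWhile_cons_of_neg hp, rd_cons]
      split_ifs with h
      · simp [hp]
      · rw [List.dropWhile_cons_of_neg hp]

theorem strip_eq' (s : List Char) :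
    PySem.Chars.strip s =
      List.dropWhile PySem.Chars.isspace (List.rdropWhile PySem.Chars.isspace s) := by
  rw [strip_eq, dw_rd_comm]

theorem strip_rstrip (z : List Char) :
    PySem.Chars.strip (PySem.Chars.rstrip z) = PySem.Chars.strip z := by
  rw [strip_eq', strip_eq', rstrip_eq, List.rdropWhile_idempotent]

theorem strip_dw (z : List Char) :
    PySem.Chars.strip (List.dropWhile PySem.Chars.isspace z) = PySem.Chars.strip z := by
  rw [strip_eq, strip_eq, List.dropWhile_idempotent]

theorem rstrip_cons_congr (c : Char) (x y : List Char)
    (h : PySem.Chars.rstrip x = PySem.Chars.rstrip y) :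
    PySem.Chars.rstrip (c :: x) = PySem.Chars.rstrip (c :: y) := by
  rw [rstrip_eq, rstrip_eq, rd_cons, rd_cons, ← rstrip_eq x, ← rstrip_eq y, h]

theorem aComment_allws (w : List Char) (in_sq in_dq : Bool)
    (h : ∀ c ∈ w, PySem.Chars.isspace c = true) :
    aComment w in_sq in_dq = w := by
  induction w with
  | nil => rfl
  | cons c w ih =>
    obtain ⟨h1, h2, h3⟩ := ws_ne c (h c (by simp))
    simp only [aComment]
    split_ifs with g1 g2 g3
    · exact absurd g1.1 h1
    · exact absurd g2.1 h2
    · exact absurd g3.1 h3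
    · rw [ih (fun x hx => h x (by simp [hx]))]

theorem aComment_dropWhile (cs : List Char) (in_sq in_dq : Bool) :
    aComment (List.dropWhile PySem.Chars.isspace cs) in_sq in_dq =
      List.dropWhile PySem.Chars.isspace (aComment cs in_sq in_dq) := by
  induction cs generalizing in_sq in_dq with
  | nil => rfl
  | cons c rest ih =>
    by_cases hw : PySem.Chars.isspace c = true
    · obtain ⟨h1, h2, h3⟩ := ws_ne c hw
      rw [List.dropWhile_cons_of_pos hw]
      have hc : aComment (c :: rest) in_sq in_dq = c :: aComment rest in_sq in_dq := by
        simp only [aComment]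
        split_ifs with g1 g2 g3
        · exact absurd g1.1 h1
        · exact absurd g2.1 h2
        · exact absurd g3.1 h3
        · rfl
      rw [hc, List.dropWhile_cons_of_pos hw, ih]
    · rw [List.dropWhile_cons_of_neg hw]
      simp only [aComment]
      split_ifs <;> simp [List.dropWhile_cons_of_neg hw]

theorem aComment_append_ws (a : List Char) (w : List Char) (in_sq in_dq : Bool)
    (hw : ∀ c ∈ w, PySem.Chars.isspace c = true) :
    PySem.Chars.rstrip (aComment (a ++ w) in_sq in_dq) =
      PySem.Chars.rstrip (aComment a in_sq in_dq) := by
  induction a generalizing in_sq in_dq with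
  | nil =>
    rw [List.nil_append, aComment_allws w in_sq in_dq hw]
    show List.rdropWhile _ _ = PySem.Chars.rstrip (aComment [] in_sq in_dq)
    simp only [aComment, rstrip_eq, List.rdropWhile_nil]
    exact List.rdropWhile_eq_nil_iff.mpr hw
  | cons c rest ih =>
    rw [List.cons_append]
    simp only [aComment]
    split_ifs
    · exact rstrip_cons_congr _ _ _ (ih _ _)
    · exact rstrip_cons_congr _ _ _ (ih _ _)
    · rfl
    · exact rstrip_cons_congr _ _ _ (ih _ _)

theorem aComment_rstrip (u : List Char) (in_sq in_dq : Bool) :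
    PySem.Chars.rstrip (aComment (PySem.Chars.rstrip u) in_sq in_dq) =
      PySem.Chars.rstrip (aComment u in_sq in_dq) := by
  conv_rhs => rw [← List.rdropWhile_append_rtakeWhile (p := PySem.Chars.isspace) (l := u)]
  rw [show List.rdropWhile PySem.Chars.isspace u = PySem.Chars.rstrip u from rfl,
    aComment_append_ws _ _ _ _ (fun c hc => List.mem_rtakeWhile_imp hc)]

theorem strip_eq_lstrip_rstrip (s : List Char) :
    PySem.Chars.strip s = PySem.Chars.lstrip (PySem.Chars.rstrip s) := by
  rw [strip_eq']; rfl

theorem strip_aC_rstrip (u : List Char) (in_sq in_dq : Bool) :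
    PySem.Chars.strip (aComment (PySem.Chars.rstrip u) in_sq in_dq) =
      PySem.Chars.strip (aComment u in_sq in_dq) := by
  rw [strip_eq_lstrip_rstrip, strip_eq_lstrip_rstrip (aComment u in_sq in_dq),
    aComment_rstrip]

theorem strip_comment_strip (t : List Char) :
    PySem.Chars.strip (PySem.Chars.rstrip (aComment (PySem.Chars.strip t) false false)) =
      PySem.Chars.strip (aComment t false false) := by
  rw [strip_rstrip,
    show PySem.Chars.strip t = PySem.Chars.rstrip (PySem.Chars.lstrip t) from rfl,
    strip_aC_rstrip,
    show PySem.Chars.lstrip t = List.dropWhile PySem.Chars.isspace t from rfl,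
    aComment_dropWhile, strip_dw]

theorem aSepScan_eq (cs : List Char) (in_sq in_dq : Bool) (i : Nat) :
    aSepScan cs in_sq in_dq i =
      (match sep? cs in_sq in_dq with
       | none => (-1 : Int)
       | some j => ((i + j : Nat) : Int)) := by
  induction cs generalizing in_sq in_dq i with
  | nil => rfl
  | cons c rest ih =>
    simp only [aSepScan, sep?]
    split_ifs
    · rw [ih]
      cases h : sep? rest (!in_sq) in_dq <;> simp [h] <;> push_cast <;> ring
    · rw [ih]
      cases h : sep? rest in_sq (!in_dq) <;> simp [h] <;> push_cast <;> ring
    · simp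
    · rw [ih]
      cases h : sep? rest in_sq in_dq <;> simp [h] <;> push_cast <;> ring

theorem bLoop_after (cs : List Char) (in_sq in_dq : Bool) (key val : List Char) :
    bLoop cs in_sq in_dq true key val = (key, val ++ aComment cs in_sq in_dq, true) := by
  induction cs generalizing in_sq in_dq val with
  | nil => simp [bLoop, aComment]
  | cons c rest ih =>
    simp only [bLoop, aComment]
    split_ifs with g1 g2 g3 g4 g5 <;>
      first
        | (exfalso; tauto)
        | (rw [ih]; simp)
        | simp

theorem bLoop_before (cs : List Char) (in_sq in_dq : Bool) (key : List Char) :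
    bLoop cs in_sq in_dq false key [] =
      (match sep? cs in_sq in_dq with
       | none => (key ++ cs, [], false)
       | some j => (key ++ cs.take j, aComment (cs.drop (j + 1)) false false, true)) := by
  induction cs generalizing in_sq in_dq key with
  | nil => simp [bLoop, sep?]
  | cons c rest ih =>
    simp only [bLoop, sep?, Bool.false_eq_true, if_false, false_and, and_false,
      eq_self_iff_true, true_and, and_true]
    split_ifs with g1 g2 g3 g4 g5 g6 g7 <;>
      first
        | (exfalso; tauto)
        | (obtain ⟨hsq, hdq, -⟩ := ‹in_sq = false ∧ in_dq = false ∧ (c = '=' ∨ c = ':')›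
           subst hsq; subst hdq
           rw [bLoop_after]
           simp)
        | (rw [ih]
           cases h : sep? rest (!in_sq) in_dq <;> simp [h, List.append_assoc]
           done)
        | (rw [ih]
           cases h : sep? rest in_sq (!in_dq) <;> simp [h, List.append_assoc]
           done)
        | (rw [ih]
           cases h : sep? rest in_sq in_dq <;> simp [h, List.append_assoc]
           done)

-- ===== VERDICT (by name: the statement is the Claim_ definition above) =====
set_option maxHeartbeats 1000000 in
theorem split_kv_py_spec : Claim_equal_split_kv_py := by
  intro line _
  show split_kv_py line = split_kv_py_alt line
  unfold split_kv_py split_kv_py_alt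
  set s0 := (PySem.Str.strip line).toList with hs0
  by_cases hg : s0 = [] ∨ PySem.Chars.startswith s0 ['#']
  · rw [if_pos hg, if_pos hg]
  · rw [if_neg hg, if_neg hg]
    generalize (if PySem.Chars.startswith s0 "export ".toList then
        PySem.Chars.lstrip (PySem.List.slice s0 (some 7) none) else s0) = s
    simp only [bLoop_before, aSepScan_eq]
    cases h : sep? s false false with
    | none => rfl
    | some j =>
      simp only [Nat.zero_add]
      by_cases hj : j = 0
      · subst hj
        rw [if_pos (by norm_num), if_neg (show ¬(true = false) by simp), List.nil_append, List.take_zero,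
          if_pos (show PySem.Chars.strip [] = [] from rfl)]
      · rw [if_neg (show ¬ ((j : Nat) : Int) ≤ 0 by exact_mod_cast hj ∘ Nat.le_zero.mp),
          if_neg (show ¬(true = false) by simp), List.nil_append,
          PySem.List.slice_to_natCast,
          show ((j : Nat) : Int) + 1 = ((j + 1 : Nat) : Int) by push_cast; ring,
          PySem.List.slice_from_natCast]
        by_cases hk : PySem.Chars.strip (List.take j s) = []
        · rw [if_pos hk, if_pos hk]
        · rw [if_neg hk, if_neg hk]
          simp only [aUnquote]
          rw [strip_comment_strip]
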